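-- pv_equiv track=rewrite | github.com/HouseK8/GuitarTabTranscirber | guitar_tab_transcriber.py | notes_to_tab
-- ===== SOURCE A (Python) =====
-- def map_pitch_to_fret(pitch, tuning):
--     string_idx = pitch % 6
--     fret = pitch // 6
--     string = tuning[string_idx]
--     return fret, string
--
-- def notes_to_tab(notes, tuning):
--     tab = {s: ["-" for _ in range(200)] for s in tuning}
--     for i, (onset, pitch) in enumerate(notes):
--         fret, string = map_pitch_to_fret(pitch, tuning)
--         if i < 200:
--             tab[string][i] = str(fret) if fret < 10 else str(fret)[-1]
--     tab_str = "\n".join(f"{s}|{'-'.join(tab[s])}|" for s in tuning[::-1])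
--     return tab_str
-- ===== SOURCE B (Python) =====
-- def notes_to_tab(notes, tuning):
--     # stage 1: flatten each of the first 200 notes to its (string value, cell text)
--     placed = [
--         (tuning[pitch % 6], str(pitch // 6) if pitch // 6 < 10 else str(pitch // 6)[-1])
--         for onset, pitch in notes[:200]
--     ]
--     # stage 2: one filtering scan of the placements per output row, padded to 200 columns
--     lines = []
--     for s in reversed(tuning):
--         cols = [cell if sv == s else "-" for sv, cell in placed]
--         cols += ["-"] * (200 - len(cols))
--         lines.append(s + "|" + "-".join(cols) + "|")
--     return "\n".join(lines)
-- ===== Notes on version B (the rewrite author's own statement) =====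
-- stated objective: simpler
-- what changed: B has no per-string grid at all: it first flattens the first 200 notes into a placement list of (string value, cell text) pairs, then renders each reversed-tuning row by a single filtering scan of that list padded to 200 columns, instead of A's dict of preallocated 200-cell rows mutated in place by note index.
import Mathlib
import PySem

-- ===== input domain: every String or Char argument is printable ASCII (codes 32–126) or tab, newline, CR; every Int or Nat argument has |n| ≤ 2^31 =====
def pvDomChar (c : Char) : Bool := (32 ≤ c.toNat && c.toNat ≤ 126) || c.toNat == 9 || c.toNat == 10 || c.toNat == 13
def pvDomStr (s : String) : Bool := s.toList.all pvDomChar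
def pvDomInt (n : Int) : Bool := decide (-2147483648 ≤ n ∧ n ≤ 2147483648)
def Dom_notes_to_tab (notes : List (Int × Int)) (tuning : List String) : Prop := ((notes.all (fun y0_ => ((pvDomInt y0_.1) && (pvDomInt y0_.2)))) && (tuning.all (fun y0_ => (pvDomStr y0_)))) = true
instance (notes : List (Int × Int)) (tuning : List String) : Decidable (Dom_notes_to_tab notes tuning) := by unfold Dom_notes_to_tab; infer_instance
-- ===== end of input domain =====

-- B drops A's per-string dense 200-cell grid entirely: it first flattens the first 200 notes
-- into a placement list (string value, cell text) and then renders each reversed-tuning row by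
-- one filtering scan of that list, padded to 200 columns; same output, a simpler two-stage plan.

-- shared primitive: Python's  str[-1]  producing a one-character string (both Pythons write 'str(fret)[-1]')
def pyLastChar (s : String) : String :=
  match PySem.Str.pyGet? s (-1) with
  | some c => String.ofList [c]
  | none => ""

-- ===== PORT A =====
-- the for-loop body of A, as a named helper
def pvStepA (tuning : List String) (tab : PySem.Dict String (List String)) (p : Int × Int × Int) : PySem.Dict String (List String) :=
  let fret := PySem.Int.floordiv p.2.2 6
  let string := PySem.List.pyGetD tuning (PySem.Int.mod p.2.2 6) ""
  if p.1 < 200 then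
    tab.modify string [] (fun row =>
      PySem.List.pySetD row p.1 (if fret < 10 then PySem.Int.toStr fret else pyLastChar (PySem.Int.toStr fret)))
  else tab

-- helper map_pitch_to_fret is inlined as its two computed values (fret, string), kept as the same values
def notes_to_tab (notes : List (Int × Int)) (tuning : List String) : String :=
  let tab : PySem.Dict String (List String) :=
    tuning.foldl (fun d s => d.insert s ((PySem.List.pyRange 0 200).map (fun _ => "-"))) PySem.Dict.empty
  let tab := (PySem.List.enumerate notes).foldl (pvStepA tuning) tab   -- IndexError inside the body excluded by Pre_
  PySem.Str.join "\n"
    (((PySem.List.slice? tuning none none (-1)).getD []).map (fun s =>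
      s ++ "|" ++ PySem.Str.join "-" (tab.getD s []) ++ "|"))

-- ===== PORT B =====
def notes_to_tab_alt (notes : List (Int × Int)) (tuning : List String) : String :=
  -- stage 1: flatten the first 200 notes to (string value, cell text) pairs
  let placed := (PySem.List.slice notes none (some 200)).map (fun p =>   -- IndexError excluded by Pre_
    (PySem.List.pyGetD tuning (PySem.Int.mod p.2 6) "",
     if PySem.Int.floordiv p.2 6 < 10 then PySem.Int.toStr (PySem.Int.floordiv p.2 6)
     else pyLastChar (PySem.Int.toStr (PySem.Int.floordiv p.2 6))))
  -- stage 2: one filtering scan of the placements per output row, padded to 200 columns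
  let lines := tuning.reverse.map (fun s =>
    let cols := placed.map (fun pc => if pc.1 = s then pc.2 else "-")
    let cols2 := cols ++ List.replicate (200 - cols.length) "-"
    s ++ "|" ++ PySem.Str.join "-" cols2 ++ "|")
  PySem.Str.join "\n" lines

-- ===== PRECONDITION & SPEC =====
-- Pre_ excludes exactly the inputs where A raises IndexError: some note whose pitch % 6 is not a valid index into tuning.
def Pre_notes_to_tab (notes : List (Int × Int)) (tuning : List String) : Prop :=
  ∀ p ∈ notes, PySem.Int.mod p.2 6 < (tuning.length : Int)
instance (notes : List (Int × Int)) (tuning : List String) : Decidable (Pre_notes_to_tab notes tuning) := by unfold Pre_notes_to_tab; infer_instance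

def pvWitness_notes_to_tab : (List (Int × Int)) × List String :=
  ([(0, 7), (1, -2), (2, 63)], ["E", "A", "D", "G", "B", "e"])

def Spec_notes_to_tab (notes : List (Int × Int)) (tuning : List String) (out : String) : Prop := out = notes_to_tab_alt notes tuning
instance (notes : List (Int × Int)) (tuning : List String) (out : String) : Decidable (Spec_notes_to_tab notes tuning out) := by unfold Spec_notes_to_tab; infer_instance

-- ===== CLAIM (what is proved, stated in full; the proofs are below) =====
def Claim_equal_notes_to_tab : Prop := ∀ (notes : List (Int × Int)) (tuning : List String), Dom_notes_to_tab notes tuning → Pre_notes_to_tab notes tuning → Spec_notes_to_tab notes tuning (notes_to_tab notes tuning)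

-- ===== LEMMAS AND PROOFS =====

-- the string and cell text a single note contributes (the common values both programs compute)
def pvStr (tuning : List String) (p : Int × Int) : String :=
  PySem.List.pyGetD tuning (PySem.Int.mod p.2 6) ""
def pvCell (p : Int × Int) : String :=
  if PySem.Int.floordiv p.2 6 < 10 then PySem.Int.toStr (PySem.Int.floordiv p.2 6)
  else pyLastChar (PySem.Int.toStr (PySem.Int.floordiv p.2 6))

-- A's grid described by a column function
def pvInv (tuning : List String) (tab : PySem.Dict String (List String)) (f : String → Nat → String) : Prop :=
  ∀ s ∈ tuning, (tab.getD s []).length = 200 ∧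
    ∀ j : Nat, j < 200 → PySem.List.pyGetD (tab.getD s []) (j : Int) "-" = f s j

-- the column function produced by placing the notes of l at columns k, k+1, …
def pvTarget (tuning : List String) (l : List (Int × Int)) (k : Nat) (g : String → Nat → String)
    (s : String) (j : Nat) : String :=
  ((if k ≤ j then l[j - k]? else none).map
    (fun p => if pvStr tuning p = s then pvCell p else "-")).getD (g s j)

lemma pvFoldl_id {α β : Type} (f : β → α → β) (l : List α) (b : β)
    (h : ∀ (b' : β) (x : α), x ∈ l → f b' x = b') : l.foldl f b = b := by
  induction l generalizing b with
  | nil => rfl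
  | cons x xs ih =>
    simp only [List.foldl_cons, h b x (List.mem_cons_self)]
    exact ih b (fun b' y hy => h b' y (List.mem_cons_of_mem _ hy))

set_option maxRecDepth 4096 in
lemma pvInitRow : ((PySem.List.pyRange 0 200).map (fun _ => ("-" : String))) = List.replicate 200 "-" := by
  decide

lemma pvTab0_getD (tuning : List String) (d : PySem.Dict String (List String)) (r : List String) (s : String) :
    (tuning.foldl (fun d s => d.insert s r) d).getD s [] = if s ∈ tuning then r else d.getD s [] := by
  induction tuning generalizing d with
  | nil => simp
  | cons t ts ih =>
    simp only [List.foldl_cons, ih, PySem.Dict.getD_insert, List.mem_cons]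
    by_cases hs : s ∈ ts <;> by_cases hst : s = t <;> simp [hs, hst]

set_option maxRecDepth 4096 in
lemma pvInv_init (tuning : List String) :
    pvInv tuning
      (tuning.foldl (fun d s => d.insert s ((PySem.List.pyRange 0 200).map (fun _ => "-"))) PySem.Dict.empty)
      (fun _ _ => "-") := by
  intro s hs
  rw [pvTab0_getD, if_pos hs, pvInitRow]
  refine ⟨by simp, fun j hj => ?_⟩
  rw [PySem.List.pyGetD_natCast, List.getD_eq_getElem?_getD,
    List.getElem?_replicate, if_pos hj, Option.getD_some]

-- placing q at column k then the rest at k+1, … is the same as placing q :: rest at k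
lemma pvTarget_cons (tuning : List String) (q : Int × Int) (rest : List (Int × Int)) (k : Nat)
    (g : String → Nat → String) (hg : ∀ s j, k ≤ j → g s j = "-") (s : String) (j : Nat) :
    pvTarget tuning rest (k + 1) (fun s j => if s = pvStr tuning q ∧ j = k then pvCell q else g s j) s j
      = pvTarget tuning (q :: rest) k g s j := by
  unfold pvTarget
  by_cases hjk1 : k + 1 ≤ j
  · have hsub : j - k = (j - (k + 1)) + 1 := by omega
    rw [if_pos hjk1, if_pos (by omega : k ≤ j), hsub, List.getElem?_cons_succ]
    cases h : rest[j - (k + 1)]? with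
    | some p => rfl
    | none =>
      have hcond : ¬ (s = pvStr tuning q ∧ j = k) := by omega
      simp [hcond]
  · rw [if_neg hjk1]
    by_cases hjk : j = k
    · subst hjk
      rw [if_pos (le_refl j), Nat.sub_self, List.getElem?_cons_zero]
      by_cases hss : s = pvStr tuning q
      · simp [hss]
      · have hss' : ¬ pvStr tuning q = s := fun h => hss h.symm
        simp [hss, hss', hg s j (le_refl j)]
    · have hcond : ¬ (s = pvStr tuning q ∧ j = k) := fun h => hjk h.2
      rw [if_neg (Nat.not_le.mpr (by omega : j < k))]
      simp [hcond]

lemma pvInv_step (tuning : List String) (l : List (Int × Int)) (k : Nat)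
    (hk2 : k + l.length ≤ 200)
    (hP : ∀ p ∈ l, PySem.Int.mod p.2 6 < (tuning.length : Int))
    (tab : PySem.Dict String (List String)) (g : String → Nat → String)
    (hg : ∀ s j, k ≤ j → g s j = "-")
    (hInv : pvInv tuning tab g) :
    pvInv tuning ((PySem.List.enumerate l (k : Int)).foldl (pvStepA tuning) tab)
      (pvTarget tuning l k g) := by
  induction l generalizing k tab g with
  | nil =>
    simp only [PySem.List.enumerate_nil, List.foldl_nil]
    intro s hs
    obtain ⟨h1, h2⟩ := hInv s hs
    refine ⟨h1, fun j hj => ?_⟩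
    simp only [pvTarget, List.getElem?_nil]
    rw [h2 j hj]
    split <;> simp
  | cons q rest ih =>
    rw [PySem.List.enumerate_cons]
    simp only [List.foldl_cons]
    have hklt : k < 200 := by simp only [List.length_cons] at hk2; omega
    have hA : pvStepA tuning tab ((k : Int), q) =
        tab.modify (pvStr tuning q) [] (fun row => PySem.List.pySetD row (k : Int) (pvCell q)) := by
      simp only [pvStepA, pvStr, pvCell]
      rw [if_pos (by exact_mod_cast hklt)]
    rw [hA]
    have hcast : ((k : Int) + 1) = (((k + 1 : Nat)) : Int) := by push_cast; ring
    rw [hcast]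
    have ihres := ih (k + 1) (by simp only [List.length_cons] at hk2; omega)
      (fun p hp => hP p (List.mem_cons_of_mem _ hp))
      (tab.modify (pvStr tuning q) [] (fun row => PySem.List.pySetD row (k : Int) (pvCell q)))
      (fun s j => if s = pvStr tuning q ∧ j = k then pvCell q else g s j)
      (fun s j hj => by
        show (if s = pvStr tuning q ∧ j = k then pvCell q else g s j) = "-"
        rw [if_neg (by omega)]; exact hg s j (by omega))
      ?_
    · -- convert the target function via pvTarget_cons
      intro s hs
      obtain ⟨h1, h2⟩ := ihres s hs
      exact ⟨h1, fun j hj => by rw [h2 j hj]; exact pvTarget_cons tuning q rest k g hg s j⟩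
    · -- the single update preserves the invariant for the updated column function
      intro s hs
      obtain ⟨h1, h2⟩ := hInv s hs
      by_cases hss : s = pvStr tuning q
      · subst hss
        rw [PySem.Dict.getD_modify, if_pos rfl]
        refine ⟨by rw [PySem.List.length_pySetD]; exact h1, fun j hj => ?_⟩
        rw [PySem.List.pyGetD_pySetD_natCast _ _ _ _ _ (by omega)]
        by_cases hjk : j = k
        · simp [hjk]
        · rw [if_neg hjk]
          have hb : (fun s j => if s = pvStr tuning q ∧ j = k then pvCell q else g s j) (pvStr tuning q) j
              = g (pvStr tuning q) j := by simp [hjk]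
          rw [hb]
          exact h2 j hj
      · rw [PySem.Dict.getD_modify, if_neg hss]
        refine ⟨h1, fun j hj => ?_⟩
        have hb : (fun s j => if s = pvStr tuning q ∧ j = k then pvCell q else g s j) s j = g s j := by
          simp [hss]
        rw [hb]
        exact h2 j hj

-- ===== VERDICT (by name: the statement is the Claim_ definition above) =====
set_option maxHeartbeats 1000000 in
theorem notes_to_tab_spec : Claim_equal_notes_to_tab := by
  intro notes tuning _ hPre
  show notes_to_tab notes tuning = notes_to_tab_alt notes tuning
  simp only [notes_to_tab, notes_to_tab_alt]
  have hsliceB : PySem.List.slice notes none (some 200) = notes.take 200 := by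
    rw [PySem.List.slice_to notes (by omega)]; rfl
  have hsplit : notes = notes.take 200 ++ notes.drop 200 := (List.take_append_drop 200 notes).symm
  have htklen : (notes.take 200).length ≤ 200 := List.length_take_le 200 notes
  -- A's fold over the tail indices ≥ 200 does nothing
  have hA_fold : (PySem.List.enumerate notes).foldl (pvStepA tuning)
        (tuning.foldl (fun d s => d.insert s ((PySem.List.pyRange 0 200).map (fun _ => "-"))) PySem.Dict.empty)
      = (PySem.List.enumerate (notes.take 200) ((0 : Nat) : Int)).foldl (pvStepA tuning)
        (tuning.foldl (fun d s => d.insert s ((PySem.List.pyRange 0 200).map (fun _ => "-"))) PySem.Dict.empty) := by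
    conv_lhs => rw [hsplit]
    rw [PySem.List.enumerate_append, List.foldl_append]
    have h0 : ((0 : Nat) : Int) = (0 : Int) := rfl
    rw [h0]
    apply pvFoldl_id
    intro b x hx
    have hx1 : 200 ≤ x.1 := by
      rw [PySem.List.mem_enumerate_iff] at hx
      obtain ⟨k, hk, rfl⟩ := hx
      by_cases hlen : notes.length ≤ 200
      · simp [List.drop_eq_nil_of_le hlen] at hk
      · have : (notes.take 200).length = 200 := by rw [List.length_take]; omega
        rw [this]; push_cast; omega
    simp only [pvStepA]
    rw [if_neg (by omega)]
  rw [hA_fold, hsliceB]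
  have hInvF := pvInv_step tuning (notes.take 200) 0 (by omega)
    (fun p hp => hPre p (List.mem_of_mem_take hp))
    _ (fun _ _ => "-") (fun _ _ _ => rfl) (pvInv_init tuning)
  -- render: tuning[::-1] is tuning.reverse on both sides
  rw [PySem.List.slice?_none_none_neg_one, Option.getD_some]
  congr 1
  apply List.map_congr_left
  intro s hs
  have hsmem : s ∈ tuning := List.mem_reverse.mp hs
  obtain ⟨hlen, hpt⟩ := hInvF s hsmem
  congr 2
  -- A's dense row equals B's filtered-and-padded column list
  congr 1
  set m := notes.take 200 with hm
  have hclen : (List.map (fun pc : String × String => if pc.1 = s then pc.2 else "-")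
      (List.map (fun p : Int × Int =>
        (PySem.List.pyGetD tuning (PySem.Int.mod p.2 6) "",
         if PySem.Int.floordiv p.2 6 < 10 then PySem.Int.toStr (PySem.Int.floordiv p.2 6)
         else pyLastChar (PySem.Int.toStr (PySem.Int.floordiv p.2 6)))) m)).length = m.length := by
    simp
  apply List.ext_getElem
  · simp only [List.length_append, List.length_replicate, hclen, hlen]
    omega
  · intro j h1 h2
    have hj200 : j < 200 := by omega
    have hA_j := hpt j hj200
    rw [PySem.List.pyGetD_natCast, List.getD_eq_getElem?_getD, List.getElem?_eq_getElem h1,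
      Option.getD_some] at hA_j
    rw [hA_j]
    simp only [pvTarget, if_pos (Nat.zero_le j), Nat.sub_zero]
    by_cases hjm : j < m.length
    · rw [List.getElem?_eq_getElem hjm, Option.map_some, Option.getD_some,
        List.getElem_append_left (by rw [hclen]; exact hjm), List.getElem_map, List.getElem_map]
      simp only [pvStr, pvCell]
    · rw [List.getElem?_eq_none (by omega), Option.map_none, Option.getD_none,
        List.getElem_append_right (by rw [hclen]; omega), List.getElem_replicate]
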